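-- pv_equiv track=rewrite | github.com/AbdurrahmanAdni/Shape-Recognition | GUI.py | isSegienamSamaSisi
-- ===== SOURCE A (Python) =====
-- import itertools
-- import itertools
--
-- def isSegienamSamaSisi(a, myList):
--     if (a == 6):
--         counter = 0
--         # combList = []
--         for L in range(0, len(myList)+1):
--             for subset in itertools.combinations(myList, L):
--                 if(len(subset) == 2) :
--                     if (abs(subset[0] - subset[1]) <=6) :
--                         counter = counter + 1
--
--         if (counter == 15) :
--             return "sisiSamaPanjang = 6"
--         else :
--             return "/"
--     else :
--         return "/"
-- ===== SOURCE B (Python) =====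
-- def isSegienamSamaSisi(a, myList):
--     if a != 6:
--         return "/"
--     counter = 0
--     xs = list(myList)
--     while xs:
--         h = xs.pop(0)
--         counter += sum(1 for y in xs if abs(h - y) <= 6)
--     return "sisiSamaPanjang = 6" if counter == 15 else "/"
-- ===== Notes on version B (the rewrite author's own statement) =====
-- stated objective: alternative
-- what changed: A enumerates subsets of every length via itertools.combinations and filters the length-2 ones; B counts qualifying pairs directly with one pass over suffixes (each element against the rest), never materialising subsets.
import Mathlib
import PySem

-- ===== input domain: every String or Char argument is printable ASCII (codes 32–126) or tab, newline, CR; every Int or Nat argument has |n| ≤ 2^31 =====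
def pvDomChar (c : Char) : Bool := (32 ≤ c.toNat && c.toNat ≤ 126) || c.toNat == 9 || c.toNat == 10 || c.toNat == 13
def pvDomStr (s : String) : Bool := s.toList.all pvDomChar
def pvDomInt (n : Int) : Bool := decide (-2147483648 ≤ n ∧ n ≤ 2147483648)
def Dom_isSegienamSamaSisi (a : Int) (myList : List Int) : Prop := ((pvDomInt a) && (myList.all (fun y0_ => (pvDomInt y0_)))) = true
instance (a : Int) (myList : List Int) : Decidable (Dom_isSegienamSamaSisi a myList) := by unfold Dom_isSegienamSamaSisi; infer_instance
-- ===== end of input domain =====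

-- B replaces A's enumeration of all subsets (filtered to length 2) by a direct
-- count of qualifying pairs over the list's suffixes; objective: alternative algorithm.

-- ===== PORT A =====
-- itertools.combinations(xs, k): all k-combinations in the order itertools yields them
-- (lexicographic by position: combinations containing the first element come first).
def pvCombinations (k : Nat) (xs : List Int) : List (List Int) :=
  match k, xs with
  | 0, _ => [[]]
  | _ + 1, [] => []
  | k + 1, x :: rest => (pvCombinations k rest).map (x :: ·) ++ pvCombinations (k + 1) rest

-- for L in range(0, len(myList)+1): for subset in combinations(myList, L): …
-- subset[0]/subset[1] are guarded by len(subset) == 2, so getD is exact here.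
def pvCounterA (myList : List Int) : Nat :=
  (List.range (myList.length + 1)).foldl
    (fun c L =>
      (pvCombinations L myList).foldl
        (fun c subset =>
          if subset.length = 2 then
            if (subset.getD 0 0 - subset.getD 1 0).natAbs ≤ 6 then c + 1 else c
          else c) c) 0

def isSegienamSamaSisi (a : Int) (myList : List Int) : String :=
  if a = 6 then
    if pvCounterA myList = 15 then "sisiSamaPanjang = 6" else "/"
  else "/"

-- ===== PORT B =====
-- while xs: h = xs.pop(0); counter += sum(1 for y in xs if abs(h - y) <= 6)
def pvCountLoop (counter : Nat) (xs : List Int) : Nat :=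
  match xs with
  | [] => counter
  | h :: rest => pvCountLoop (counter + rest.countP (fun y => (h - y).natAbs ≤ 6)) rest

def isSegienamSamaSisi_alt (a : Int) (myList : List Int) : String :=
  if a ≠ 6 then "/"
  else if pvCountLoop 0 myList = 15 then "sisiSamaPanjang = 6" else "/"

-- ===== PRECONDITION & SPEC =====
def Spec_isSegienamSamaSisi (a : Int) (myList : List Int) (out : String) : Prop := out = isSegienamSamaSisi_alt a myList
instance (a : Int) (myList : List Int) (out : String) : Decidable (Spec_isSegienamSamaSisi a myList out) := by unfold Spec_isSegienamSamaSisi; infer_instance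

-- ===== CLAIM (what is proved, stated in full; the proofs are below) =====
def Claim_equal_isSegienamSamaSisi : Prop := ∀ (a : Int) (myList : List Int), Dom_isSegienamSamaSisi a myList → Spec_isSegienamSamaSisi a myList (isSegienamSamaSisi a myList)

-- ===== LEMMAS AND PROOFS =====

-- the predicate A's inner loop tests
def pvP (s : List Int) : Bool := s.length = 2 && (s.getD 0 0 - s.getD 1 0).natAbs ≤ 6

lemma pvComb_len : ∀ (k : Nat) (xs : List Int), ∀ s ∈ pvCombinations k xs, s.length = k := by
  intro k xs
  induction xs generalizing k with
  | nil => cases k <;> simp [pvCombinations]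
  | cons x rest ih =>
    cases k with
    | zero => simp [pvCombinations]
    | succ k =>
      intro s hs
      simp only [pvCombinations, List.mem_append, List.mem_map] at hs
      rcases hs with ⟨t, ht, rfl⟩ | h
      · simp [ih k t ht]
      · exact ih (k + 1) s h

lemma pvComb_one (xs : List Int) : pvCombinations 1 xs = xs.map (fun y => [y]) := by
  induction xs with
  | nil => simp [pvCombinations]
  | cons x rest ih => simp [pvCombinations, ih]

-- A's inner fold counts pvP
lemma pvInner_foldl (l : List (List Int)) (c : Nat) :
    l.foldl (fun c subset =>
      if subset.length = 2 then
        if (subset.getD 0 0 - subset.getD 1 0).natAbs ≤ 6 then c + 1 else c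
      else c) c = c + l.countP pvP := by
  induction l generalizing c with
  | nil => simp
  | cons s t ih =>
    simp only [List.foldl_cons, List.countP_cons, ih, pvP]
    split_ifs with h1 h2 <;> simp_all <;> omega

-- countP pvP over the 2-combinations is the pair count
lemma pvCountLoop_acc (acc : Nat) (xs : List Int) : pvCountLoop acc xs = acc + pvCountLoop 0 xs := by
  induction xs generalizing acc with
  | nil => simp [pvCountLoop]
  | cons h t ih =>
    simp only [pvCountLoop]
    rw [ih, ih (0 + _)]
    omega

lemma pvComb_two (xs : List Int) : (pvCombinations 2 xs).countP pvP = pvCountLoop 0 xs := by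
  induction xs with
  | nil => simp [pvCombinations, pvCountLoop]
  | cons x rest ih =>
    have : pvCombinations 2 (x :: rest)
        = (rest.map (fun y => [x, y])) ++ pvCombinations 2 rest := by
      show (pvCombinations 1 rest).map (x :: ·) ++ pvCombinations 2 rest = _
      simp [pvComb_one, List.map_map, Function.comp_def]
    rw [this, List.countP_append, ih, List.countP_map]
    have h2 : rest.countP (pvP ∘ fun y => [x, y])
        = rest.countP (fun y => (x - y).natAbs ≤ 6) := by
      apply List.countP_congr
      intro y _
      simp [pvP, List.getD]
    rw [h2, show pvCountLoop 0 (x :: rest)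
        = pvCountLoop (0 + rest.countP (fun y => (x - y).natAbs ≤ 6)) rest from rfl,
      pvCountLoop_acc (0 + rest.countP (fun y => (x - y).natAbs ≤ 6)) rest]
    omega

lemma pvOuter_foldl (g : Nat → Nat) (hg : ∀ L, L ≠ 2 → g L = 0) :
    ∀ (m c : Nat), (List.range m).foldl (fun c L => c + g L) c
      = c + (if 2 < m then g 2 else 0) := by
  intro m
  induction m with
  | zero => simp
  | succ m ih =>
    intro c
    rw [List.range_succ, List.foldl_append, ih]
    simp only [List.foldl_cons, List.foldl_nil]
    by_cases h2 : m = 2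
    · subst h2; simp
    · rw [hg m h2]
      split_ifs <;> omega

-- A's counter equals B's counter
lemma pvCounter_eq (myList : List Int) :
    pvCounterA myList = pvCountLoop 0 myList := by
  unfold pvCounterA
  have hfold : ∀ c L, (pvCombinations L myList).foldl
      (fun c subset =>
        if subset.length = 2 then
          if (subset.getD 0 0 - subset.getD 1 0).natAbs ≤ 6 then c + 1 else c
        else c) c = c + (pvCombinations L myList).countP pvP :=
    fun c L => pvInner_foldl _ c
  calc (List.range (myList.length + 1)).foldl _ 0
      = (List.range (myList.length + 1)).foldl
          (fun c L => c + (pvCombinations L myList).countP pvP) 0 := by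
        apply PySem.List.foldl_congr_mem
        intro c L _
        exact hfold c L
    _ = 0 + (if 2 < myList.length + 1 then (pvCombinations 2 myList).countP pvP else 0) := by
        apply pvOuter_foldl
        intro L hL
        rw [List.countP_eq_zero]
        intro s hs
        have := pvComb_len L myList s hs
        simp [pvP, this, hL]
    _ = pvCountLoop 0 myList := by
        split_ifs with h
        · simpa using pvComb_two myList
        · have : pvCountLoop 0 myList = 0 := by
            match myList, (by omega : myList.length < 2) with
            | [], _ => rfl
            | [x], _ => simp [pvCountLoop]
          omega

-- ===== VERDICT (by name: the statement is the Claim_ definition above) =====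
theorem isSegienamSamaSisi_spec : Claim_equal_isSegienamSamaSisi := by
  intro a myList _
  unfold Spec_isSegienamSamaSisi isSegienamSamaSisi isSegienamSamaSisi_alt
  by_cases h : a = 6
  · subst h
    rw [if_pos rfl, if_neg (show ¬((6 : Int) ≠ 6) by simp), pvCounter_eq]
  · rw [if_neg h, if_pos h]
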